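-- pv_equiv track=rewrite | github.com/hscspring/The-DataStructure-and-Algorithms | CodingInterview2/68_CommonParentInTree/common_parent_in_tree.py | get_last_common_node
-- ===== SOURCE A (Python) =====
-- def get_last_common_node(path1: list, path2: list) -> int:
--     i = 0
--     last = None
--     while i < len(path1) and i < len(path2):
--         if path1[i] == path2[i]:
--             last = path1[i]
--         i += 1
--     return last
-- ===== SOURCE B (Python) =====
-- def get_last_common_node(path1: list, path2: list) -> int:
--     for i in range(min(len(path1), len(path2)) - 1, -1, -1):
--         if path1[i] == path2[i]:
--             return path1[i]
--     return None
-- ===== Notes on version B (the rewrite author's own statement) =====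
-- stated objective: faster
-- what changed: Replaces the forward full scan that keeps overwriting a `last` accumulator with a backward scan that early-returns at the first (i.e. highest) matching index.
import Mathlib
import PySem

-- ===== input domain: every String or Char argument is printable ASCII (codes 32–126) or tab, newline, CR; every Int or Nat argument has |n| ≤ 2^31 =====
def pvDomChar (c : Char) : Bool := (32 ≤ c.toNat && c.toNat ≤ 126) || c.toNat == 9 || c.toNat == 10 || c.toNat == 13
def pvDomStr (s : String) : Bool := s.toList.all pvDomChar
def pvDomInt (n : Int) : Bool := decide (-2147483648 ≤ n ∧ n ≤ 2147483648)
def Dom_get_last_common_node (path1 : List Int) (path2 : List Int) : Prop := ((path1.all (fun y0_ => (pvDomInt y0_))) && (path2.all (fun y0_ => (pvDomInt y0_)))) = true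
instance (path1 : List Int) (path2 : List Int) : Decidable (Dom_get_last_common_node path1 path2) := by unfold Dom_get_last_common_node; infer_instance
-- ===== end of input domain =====

-- B replaces A's forward scan with an overwritten `last` accumulator by a backward
-- early-returning scan for the highest matching index (alternative decomposition).


-- ===== PORT A =====
-- while i < len(path1) and i < len(path2): if path1[i] == path2[i]: last = path1[i]; i += 1
-- indexing via getD is exact here since the loop guard guarantees i < both lengths
def pvALoop (path1 path2 : List Int) (i : Nat) (last : Option Int) : Option Int :=
  if i < path1.length ∧ i < path2.length then
    pvALoop path1 path2 (i + 1)
      (if path1.getD i 0 = path2.getD i 0 then some (path1.getD i 0) else last)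
  else last
termination_by path1.length - i
decreasing_by omega

def get_last_common_node (path1 : List Int) (path2 : List Int) : Option Int :=
  pvALoop path1 path2 0 none

-- ===== PORT B =====
-- for i in range(min(len1,len2)-1, -1, -1): if path1[i]==path2[i]: return path1[i]; return None
-- pvBGo k examines indices k-1, k-2, …, 0; indexing via getD is exact since k ≤ min of the lengths
def pvBGo (path1 path2 : List Int) : Nat → Option Int
  | 0 => none
  | k + 1 =>
    if path1.getD k 0 = path2.getD k 0 then some (path1.getD k 0)
    else pvBGo path1 path2 k

def get_last_common_node_alt (path1 : List Int) (path2 : List Int) : Option Int :=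
  pvBGo path1 path2 (min path1.length path2.length)

-- ===== PRECONDITION & SPEC =====
def Spec_get_last_common_node (path1 : List Int) (path2 : List Int) (out : Option Int) : Prop := out = get_last_common_node_alt path1 path2
instance (path1 : List Int) (path2 : List Int) (out : Option Int) : Decidable (Spec_get_last_common_node path1 path2 out) := by unfold Spec_get_last_common_node; infer_instance

-- ===== CLAIM (what is proved, stated in full; the proofs are below) =====
def Claim_equal_get_last_common_node : Prop := ∀ (path1 : List Int) (path2 : List Int), Dom_get_last_common_node path1 path2 → Spec_get_last_common_node path1 path2 (get_last_common_node path1 path2)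

-- ===== LEMMAS AND PROOFS =====

-- backward search over indices [i, i+f), highest first, falling back to `last`
def pvBSeg (path1 path2 : List Int) (i : Nat) : Nat → Option Int → Option Int
  | 0, last => last
  | f + 1, last =>
    if path1.getD (i + f) 0 = path2.getD (i + f) 0 then some (path1.getD (i + f) 0)
    else pvBSeg path1 path2 i f last

-- peel the BOTTOM index off a backward segment search
theorem pvBSeg_bottom (p1 p2 : List Int) (i f : Nat) (last : Option Int) :
    pvBSeg p1 p2 i (f + 1) last
      = pvBSeg p1 p2 (i + 1) f
          (if p1.getD i 0 = p2.getD i 0 then some (p1.getD i 0) else last) := by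
  induction f generalizing last with
  | zero => simp [pvBSeg]
  | succ f ih =>
    show (if p1.getD (i + (f + 1)) 0 = p2.getD (i + (f + 1)) 0
            then some (p1.getD (i + (f + 1)) 0)
            else pvBSeg p1 p2 i (f + 1) last) = _
    rw [ih]
    have h1 : i + (f + 1) = (i + 1) + f := by omega
    rw [h1]
    rfl

theorem pvALoop_eq_pvBSeg (p1 p2 : List Int) (f i : Nat) (last : Option Int)
    (h : min p1.length p2.length = i + f) :
    pvALoop p1 p2 i last = pvBSeg p1 p2 i f last := by
  induction f generalizing i last with
  | zero =>
    rw [pvALoop]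
    have : ¬ (i < p1.length ∧ i < p2.length) := by omega
    simp [this, pvBSeg]
  | succ f ih =>
    rw [pvALoop]
    have hlt : i < p1.length ∧ i < p2.length := by omega
    simp only [hlt, and_self, if_true]
    rw [ih (i + 1) _ (by omega), pvBSeg_bottom]

theorem pvBSeg_zero_eq_pvBGo (p1 p2 : List Int) (f : Nat) :
    pvBSeg p1 p2 0 f none = pvBGo p1 p2 f := by
  induction f with
  | zero => rfl
  | succ f ih => simp only [pvBSeg, pvBGo, Nat.zero_add, ih]

-- ===== VERDICT (by name: the statement is the Claim_ definition above) =====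
theorem get_last_common_node_spec : Claim_equal_get_last_common_node := by
  intro p1 p2 _
  unfold Spec_get_last_common_node get_last_common_node get_last_common_node_alt
  rw [pvALoop_eq_pvBSeg p1 p2 (min p1.length p2.length) 0 none (by omega),
    pvBSeg_zero_eq_pvBGo]
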